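-- pv_equiv track=rewrite | github.com/Raminpahnabi/StokesFlow | HWs/HW6/HW6__Ans/Averett_Isaac_ia258_CE_ME_507_MultiDimensionalBasisFunctions.py | convert_single_index_to_multi_index
-- ===== SOURCE A (Python) =====
-- def convert_single_index_to_multi_index(A, degs):
--     multi_index = []
--     nsd = len(degs)  # Number of spatial dimensions
--     for i in range(nsd):
--         pi_plus_1 = degs[i] + 1  # p0 + 1, p1 + 1, etc.
--         ai = A % pi_plus_1  # Compute a_i as A mod (p_i + 1)
--         multi_index.append(ai)
--         A = A // pi_plus_1  # Update A for the next index computation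
--     return multi_index
-- ===== SOURCE B (Python) =====
-- def convert_single_index_to_multi_index(A, degs):
--     digits, _ = _digits_and_quotient(A, degs)
--     return digits
--
-- def _digits_and_quotient(A, degs):
--     # Divide-and-conquer: extract the digits of the left half, thread the
--     # remaining quotient into the right half, concatenate.
--     if not degs:
--         return [], A
--     if len(degs) == 1:
--         r = degs[0] + 1
--         return [A % r], A // r
--     mid = len(degs) // 2
--     left, q = _digits_and_quotient(A, degs[:mid])
--     right, q2 = _digits_and_quotient(q, degs[mid:])
--     return left + right, q2
-- ===== Notes on version B (the rewrite author's own statement) =====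
-- stated objective: alternative
-- what changed: Replaces A's linear divide-down loop over a mutated running quotient with a divide-and-conquer recursion that splits the radix list in half, extracts the left half's digits, threads the resulting quotient into the right half, and concatenates.
import Mathlib
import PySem

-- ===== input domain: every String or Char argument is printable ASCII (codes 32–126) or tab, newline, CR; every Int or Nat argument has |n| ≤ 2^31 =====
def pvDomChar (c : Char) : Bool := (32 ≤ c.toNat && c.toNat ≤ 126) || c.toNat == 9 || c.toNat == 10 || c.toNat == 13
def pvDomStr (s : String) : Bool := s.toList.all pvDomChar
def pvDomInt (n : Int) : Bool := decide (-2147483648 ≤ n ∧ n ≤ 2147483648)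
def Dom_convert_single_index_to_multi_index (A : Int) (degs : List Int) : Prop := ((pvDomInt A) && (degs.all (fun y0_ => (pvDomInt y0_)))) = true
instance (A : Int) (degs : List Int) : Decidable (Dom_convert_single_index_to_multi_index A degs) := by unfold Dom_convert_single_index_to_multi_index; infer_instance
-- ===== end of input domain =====

-- B replaces A's linear divide-down loop by a divide-and-conquer recursion (split the
-- radix list in half, thread the quotient from the left half into the right half);
-- objective: alternative structure, same exact values.

-- ===== PORT A =====
def convert_single_index_to_multi_index (A : Int) (degs : List Int) : List Int :=
  let nsd := degs.length
  ((PySem.List.pyRange 0 (nsd : Int) 1).foldl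
    (fun (st : Int × List Int) i =>
      let pi_plus_1 := PySem.List.pyGetD degs i 0 + 1   -- degs[i]; i is always in range
      let ai := PySem.Int.mod st.1 pi_plus_1
      (PySem.Int.floordiv st.1 pi_plus_1, st.2 ++ [ai]))
    (A, [])).2

-- ===== PORT B =====
-- _digits_and_quotient from Source B; degs[:mid]/degs[mid:] with mid = len//2 are exact
-- as List.take/List.drop since mid is a nonnegative in-range index.
def pvDQ (A : Int) (degs : List Int) : List Int × Int :=
  match degs with
  | [] => ([], A)
  | [d] =>
      let r := d + 1
      ([PySem.Int.mod A r], PySem.Int.floordiv A r)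
  | d0 :: d1 :: rest =>
      let degs' := d0 :: d1 :: rest
      let mid := degs'.length / 2
      let left := pvDQ A (degs'.take mid)
      let right := pvDQ left.2 (degs'.drop mid)
      (left.1 ++ right.1, right.2)
termination_by degs.length
decreasing_by
  · simp [List.length_take]; omega
  · simp [List.length_drop]; omega

def convert_single_index_to_multi_index_alt (A : Int) (degs : List Int) : List Int :=
  (pvDQ A degs).1

-- ===== PRECONDITION & SPEC =====
-- Pre_ excludes exactly the inputs where the Python A raises ZeroDivisionError
-- (some degree equals -1, so a radix degs[i]+1 is 0); B raises there too.
def Pre_convert_single_index_to_multi_index (A : Int) (degs : List Int) : Prop :=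
  (-1 : Int) ∉ degs
instance (A : Int) (degs : List Int) : Decidable (Pre_convert_single_index_to_multi_index A degs) := by unfold Pre_convert_single_index_to_multi_index; infer_instance

def pvWitness_convert_single_index_to_multi_index : Int × List Int := (7, [2, 3])

def Spec_convert_single_index_to_multi_index (A : Int) (degs : List Int) (out : List Int) : Prop := out = convert_single_index_to_multi_index_alt A degs
instance (A : Int) (degs : List Int) (out : List Int) : Decidable (Spec_convert_single_index_to_multi_index A degs out) := by unfold Spec_convert_single_index_to_multi_index; infer_instance

-- ===== CLAIM (what is proved, stated in full; the proofs are below) =====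
def Claim_equal_convert_single_index_to_multi_index : Prop := ∀ (A : Int) (degs : List Int), Dom_convert_single_index_to_multi_index A degs → Pre_convert_single_index_to_multi_index A degs → Spec_convert_single_index_to_multi_index A degs (convert_single_index_to_multi_index A degs)

-- ===== LEMMAS AND PROOFS =====

-- Reference one-step divide-down recursion: (digits, final quotient).
def pvDigits (A : Int) (degs : List Int) : List Int × Int :=
  match degs with
  | [] => ([], A)
  | d :: t =>
      let r := d + 1
      let rest := pvDigits (PySem.Int.floordiv A r) t
      (PySem.Int.mod A r :: rest.1, rest.2)

theorem pvDigits_append (xs : List Int) : ∀ (A : Int) (ys : List Int),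
    pvDigits A (xs ++ ys) =
      ((pvDigits A xs).1 ++ (pvDigits (pvDigits A xs).2 ys).1,
       (pvDigits (pvDigits A xs).2 ys).2) := by
  induction xs with
  | nil => intro A ys; simp [pvDigits]
  | cons d t ih => intro A ys; simp [pvDigits, ih]

theorem pvDQ_eq_pvDigits (A : Int) (degs : List Int) : pvDQ A degs = pvDigits A degs := by
  induction A, degs using pvDQ.induct with
  | case1 A => simp [pvDQ, pvDigits]
  | case2 A d => simp [pvDQ, pvDigits]
  | case3 A d0 d1 rest degsv midv leftv ih1 ih2 ih3 =>
      rw [pvDQ, ih3, ih1]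
      conv_rhs => rw [← List.take_append_drop ((d0 :: d1 :: rest).length / 2) (d0 :: d1 :: rest)]
      rw [pvDigits_append]
      simp only [degsv, midv, leftv, ih1]

theorem foldA (t : List Int) : ∀ (A : Int) (acc : List Int),
    ((List.range t.length).foldl
      (fun (st : Int × List Int) k =>
        let pi_plus_1 := t.getD k 0 + 1
        (PySem.Int.floordiv st.1 pi_plus_1, st.2 ++ [PySem.Int.mod st.1 pi_plus_1]))
      (A, acc)).2 = acc ++ (pvDigits A t).1 := by
  induction t with
  | nil => intro A acc; simp [pvDigits]
  | cons d t ih =>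
      intro A acc
      simp only [List.length_cons, List.range_succ_eq_map, List.foldl_cons, List.foldl_map,
        List.getD_cons_zero, List.getD_cons_succ]
      rw [ih]
      simp [pvDigits]

-- ===== VERDICT (by name: the statement is the Claim_ definition above) =====
theorem convert_single_index_to_multi_index_spec : Claim_equal_convert_single_index_to_multi_index := by
  intro A degs _ _
  unfold Spec_convert_single_index_to_multi_index
  unfold convert_single_index_to_multi_index convert_single_index_to_multi_index_alt
  rw [pvDQ_eq_pvDigits]
  simp only [PySem.List.pyRange_zero_nat, List.foldl_map, PySem.List.pyGetD_natCast]
  exact foldA degs A []
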